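-- pv_equiv track=rewrite | github.com/abhishekir/CodingBat_Solutions | src/String_2.py | xyBalance
-- ===== SOURCE A (Python) =====
-- def xyBalance(str):
--     seenX = False
--     for i in range(len(str)):
--         if str[i] == "x":
--             seenX = True
--         elif str[i] == "y":
--             seenX = False
--     return not seenX
-- ===== SOURCE B (Python) =====
-- def xyBalance(str):
--     return str.rfind("x") <= str.rfind("y")
-- ===== Notes on version B (the rewrite author's own statement) =====
-- stated objective: simpler
-- what changed: Replaces the forward state-tracking loop with a closed comparison of the last positions of 'x' and 'y' via str.rfind (<= so the no-x/no-y case gives -1 <= -1 = True).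
import Mathlib
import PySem

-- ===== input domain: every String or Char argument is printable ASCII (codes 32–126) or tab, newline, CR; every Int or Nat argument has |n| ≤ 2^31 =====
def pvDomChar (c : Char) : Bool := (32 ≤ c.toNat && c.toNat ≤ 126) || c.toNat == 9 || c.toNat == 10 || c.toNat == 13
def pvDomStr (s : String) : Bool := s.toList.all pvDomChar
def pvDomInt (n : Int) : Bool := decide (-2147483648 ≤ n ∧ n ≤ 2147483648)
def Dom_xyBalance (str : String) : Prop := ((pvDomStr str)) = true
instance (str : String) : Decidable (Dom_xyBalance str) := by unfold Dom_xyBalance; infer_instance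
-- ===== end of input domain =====

-- B replaces A's forward seenX-tracking loop by a closed comparison of the last
-- positions of 'x' and 'y' (str.rfind), using <= so the no-x/no-y case (-1 <= -1) is True.

-- ===== PORT A =====
-- forward loop over the characters, tracking whether an 'x' is still unmatched
def xyBalance (str : String) : Bool :=
  let seenX := str.toList.foldl
    (fun seenX c => if c = 'x' then true else if c = 'y' then false else seenX) false
  !seenX

-- ===== PORT B =====
def xyBalance_alt (str : String) : Bool :=
  decide (PySem.Str.rfind str "x" ≤ PySem.Str.rfind str "y")

-- ===== PRECONDITION & SPEC =====
def Spec_xyBalance (str : String) (out : Bool) : Prop := out = xyBalance_alt str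
instance (str : String) (out : Bool) : Decidable (Spec_xyBalance str out) := by unfold Spec_xyBalance; infer_instance

-- ===== CLAIM (what is proved, stated in full; the proofs are below) =====
def Claim_equal_xyBalance : Prop := ∀ (str : String), Dom_xyBalance str → Spec_xyBalance str (xyBalance str)

-- ===== LEMMAS AND PROOFS =====

lemma pv_go_zero (s sub : List Char) :
    PySem.Chars.rfind.go s sub 0 = if sub.isPrefixOf s then 0 else -1 := rfl

lemma pv_go_succ (s sub : List Char) (j : ℕ) :
    PySem.Chars.rfind.go s sub (j + 1)
      = if sub.isPrefixOf (s.drop (j + 1)) then ((j : ℤ) + 1) else PySem.Chars.rfind.go s sub j := by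
  show PySem.Chars.rfind.go s sub (Nat.succ j) = _
  rw [PySem.Chars.rfind.go]
  rfl

lemma pv_singleton_isPrefixOf_cons (d a : Char) (t : List Char) :
    [d].isPrefixOf (a :: t) = (d == a) := by
  simp [List.isPrefixOf]

lemma pv_go_le (s : List Char) (d : Char) (i : ℕ) :
    PySem.Chars.rfind.go s [d] i ≤ (i : ℤ) := by
  induction i with
  | zero => rw [pv_go_zero]; split_ifs <;> omega
  | succ j ih => rw [pv_go_succ]; split_ifs <;> omega

lemma pv_go_append (l : List Char) (c d : Char) :
    ∀ i : ℕ, i < l.length →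
      PySem.Chars.rfind.go (l ++ [c]) [d] i = PySem.Chars.rfind.go l [d] i := by
  intro i
  induction i with
  | zero =>
    intro h
    rw [pv_go_zero, pv_go_zero]
    cases l with
    | nil => simp at h
    | cons a t => simp [pv_singleton_isPrefixOf_cons]
  | succ j ih =>
    intro h
    rw [pv_go_succ, pv_go_succ]
    rw [List.drop_append_of_le_length (by omega)]
    have hne : l.drop (j + 1) ≠ [] := by
      simp [List.drop_eq_nil_iff]; omega
    cases hd : l.drop (j + 1) with
    | nil => exact absurd hd hne
    | cons a t =>
      simp only [List.cons_append, pv_singleton_isPrefixOf_cons]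
      split_ifs with hb
      · rfl
      · exact ih (by omega)

lemma pv_rfind_snoc (l : List Char) (c d : Char) :
    PySem.Chars.rfind (l ++ [c]) [d]
      = if d = c then (l.length : ℤ) else PySem.Chars.rfind l [d] := by
  unfold PySem.Chars.rfind
  have hlen : (l ++ [c]).length = l.length + 1 := by simp
  rw [hlen, pv_go_succ]
  have hdrop : (l ++ [c]).drop (l.length + 1) = [] := by simp
  rw [hdrop]
  simp only [List.isPrefixOf]
  cases l with
  | nil =>
    simp only [List.length_nil, List.nil_append, pv_go_zero, pv_singleton_isPrefixOf_cons]
    by_cases h : d = c <;> simp [h]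
  | cons a t =>
    have hlen2 : (a :: t).length = t.length + 1 := by simp
    rw [hlen2, pv_go_succ, pv_go_succ]
    have hdrop2 : (a :: t).drop (t.length + 1) = [] := by simp
    have hdrop3 : ((a :: t) ++ [c]).drop (t.length + 1) = [c] := by
      rw [List.drop_append_of_le_length (by simp), hdrop2]; rfl
    rw [hdrop2, hdrop3, pv_singleton_isPrefixOf_cons]
    simp only [if_neg (by simp : ¬ ([d].isPrefixOf ([] : List Char) = true))]
    by_cases h : d = c
    · simp [h]
    · rw [if_neg h, pv_go_append (a :: t) c d t.length (by simp)]
      simp [h]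

lemma pv_rfind_lt (l : List Char) (d : Char) :
    PySem.Chars.rfind l [d] < (l.length : ℤ) := by
  unfold PySem.Chars.rfind
  cases l with
  | nil =>
    simp only [List.length_nil, pv_go_zero]
    simp [List.isPrefixOf]
  | cons a t =>
    have hlen : (a :: t).length = t.length + 1 := by simp
    rw [hlen, pv_go_succ]
    have hdrop : (a :: t).drop (t.length + 1) = [] := by simp
    rw [hdrop]
    simp only [if_neg (by simp : ¬ ([d].isPrefixOf ([] : List Char) = true))]
    have := pv_go_le (a :: t) d t.length
    omega

lemma pv_key (l : List Char) :
    (! l.foldl (fun seenX c => if c = 'x' then true else if c = 'y' then false else seenX) false)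
      = decide (PySem.Chars.rfind l ['x'] ≤ PySem.Chars.rfind l ['y']) := by
  induction l using List.reverseRecOn with
  | nil => rfl
  | append_singleton l c ih =>
    rw [List.foldl_append, List.foldl_cons, List.foldl_nil,
      pv_rfind_snoc, pv_rfind_snoc]
    by_cases hx : c = 'x'
    · subst hx
      have hy := pv_rfind_lt l 'y'
      rw [eq_comm]
      simp only [if_neg (show ¬ ('y' : Char) = 'x' by decide), if_true, Bool.not_true]
      rw [decide_eq_false_iff_not]
      omega
    · by_cases hy : c = 'y'
      · subst hy
        have hx2 := pv_rfind_lt l 'x'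
        rw [eq_comm]
        simp only [if_neg (show ¬ ('x' : Char) = 'y' by decide),
          if_neg (show ¬ ('y' : Char) = 'x' by decide), if_true, Bool.not_false]
        rw [decide_eq_true_iff]
        omega
      · rw [if_neg hx, if_neg hy, if_neg (fun h => hx h.symm), if_neg (fun h => hy h.symm)]
        exact ih

-- ===== VERDICT (by name: the statement is the Claim_ definition above) =====
theorem xyBalance_spec : Claim_equal_xyBalance := by
  intro str _
  unfold Spec_xyBalance xyBalance xyBalance_alt
  rw [PySem.Str.rfind_eq, PySem.Str.rfind_eq]
  have hx : ("x" : String).toList = ['x'] := rfl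
  have hy : ("y" : String).toList = ['y'] := rfl
  rw [hx, hy]
  exact pv_key str.toList
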